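-- pv_equiv track=rewrite | github.com/mendez6412/mystery-word | evil_mystery_word.py | partition_word_list
-- ===== SOURCE A (Python) =====
-- def partition_word_list(guess, wrdlst):
--     families = {}
--     for word in wrdlst:
--         fltr = ''.join(guess if letter == guess else '-' for letter in word)
--         if fltr not in families:
--             families[fltr] = []
--         families[fltr].append(word)
--     return families
-- ===== SOURCE B (Python) =====
-- def partition_word_list(guess, wrdlst):
--     filters = [''.join(guess if letter == guess else '-' for letter in word)
--                for word in wrdlst]
--     keys = list(dict.fromkeys(filters))
--     return {k: [w for w, f in zip(wrdlst, filters) if f == k] for k in keys}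
-- ===== Notes on version B (the rewrite author's own statement) =====
-- stated objective: alternative
-- what changed: Replaces the single-pass mutable-dict accumulation with a table-first decomposition: precompute the filter of every word, ordered-dedup the filters to get the keys, then build each family with a per-key filtered scan over the (word, filter) table.
import Mathlib
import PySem

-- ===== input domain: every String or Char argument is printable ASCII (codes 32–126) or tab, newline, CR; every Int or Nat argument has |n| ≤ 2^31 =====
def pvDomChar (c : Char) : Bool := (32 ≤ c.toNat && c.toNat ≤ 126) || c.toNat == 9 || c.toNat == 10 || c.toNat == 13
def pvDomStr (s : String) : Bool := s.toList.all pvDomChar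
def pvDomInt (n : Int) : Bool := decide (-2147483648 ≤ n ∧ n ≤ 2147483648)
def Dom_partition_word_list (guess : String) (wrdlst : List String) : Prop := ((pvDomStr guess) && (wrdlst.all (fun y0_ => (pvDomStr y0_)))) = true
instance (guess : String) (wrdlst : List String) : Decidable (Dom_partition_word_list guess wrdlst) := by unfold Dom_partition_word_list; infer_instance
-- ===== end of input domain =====

-- B replaces A's single-pass mutable-dict accumulation by a table-first decomposition
-- (precompute all filters, ordered-dedup them to get the keys, then one filtered scan
-- of the (word, filter) table per key); objective: alternative, same return value.

-- shared helter: fltr = ''.join(guess if letter == guess else '-' for letter in word)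
-- (both Pythons compute the filter string with exactly this expression)
def pvFltr (guess : String) (word : String) : String :=
  PySem.Str.join "" (word.toList.map (fun letter => if String.ofList [letter] == guess then guess else "-"))

-- ===== PORT A =====
def partition_word_list (guess : String) (wrdlst : List String) : List (String × List String) :=
  (wrdlst.foldl (fun families word =>
      let fltr := pvFltr guess word
      let families1 := if families.contains fltr then families else families.insert fltr ([] : List String)
      families1.modify fltr [] (fun l => l ++ [word]))
    PySem.Dict.empty).items

-- ===== PORT B =====
def partition_word_list_alt (guess : String) (wrdlst : List String) : List (String × List String) :=
  let filters := wrdlst.map (fun word => pvFltr guess word)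
  let keys := PySem.List.dedup filters
  keys.map (fun k => (k, ((wrdlst.zip filters).filter (fun p => p.2 == k)).map (fun p => p.1)))

-- ===== PRECONDITION & SPEC =====
def Spec_partition_word_list (guess : String) (wrdlst : List String) (out : List (String × List String)) : Prop := out = partition_word_list_alt guess wrdlst
instance (guess : String) (wrdlst : List String) (out : List (String × List String)) : Decidable (Spec_partition_word_list guess wrdlst out) := by unfold Spec_partition_word_list; infer_instance

-- ===== CLAIM (what is proved, stated in full; the proofs are below) =====
def Claim_equal_partition_word_list : Prop := ∀ (guess : String) (wrdlst : List String), Dom_partition_word_list guess wrdlst → Spec_partition_word_list guess wrdlst (partition_word_list guess wrdlst)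

-- ===== LEMMAS AND PROOFS =====

-- A's loop body ('if fltr not in families: families[fltr] = []; families[fltr].append(word)')
-- is one modify: on an absent key, insert-empty-then-append equals append-to-default.
theorem pwl_step (d : PySem.Dict String (List String)) (k : String) (w : String) :
    (if d.contains k then d else d.insert k ([] : List String)).modify k [] (fun l => l ++ [w])
      = d.modify k [] (fun l => l ++ [w]) := by
  by_cases h : d.contains k = true
  · simp [h]
  · have h' : d.contains k = false := by simpa using h
    rw [if_neg (by simp [h'])]
    simp [PySem.Dict.modify, PySem.Dict.getD_insert_self, PySem.Dict.insert_insert_self,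
      PySem.Dict.getD_of_not_contains, h']

-- A's fold over words is the modify-fold over the (filter, word) table.
theorem pwl_foldA (guess : String) (ws : List String) (d : PySem.Dict String (List String)) :
    ws.foldl (fun families word =>
        (if families.contains (pvFltr guess word) then families
         else families.insert (pvFltr guess word) ([] : List String)).modify
          (pvFltr guess word) [] (fun l => l ++ [word])) d
      = (ws.map (fun w => (pvFltr guess w, w))).foldl
          (fun d p => d.modify p.1 [] (fun l => l ++ [p.2])) d := by
  induction ws generalizing d with
  | nil => rfl
  | cons w t ih =>
    rw [List.foldl_cons, List.map_cons, List.foldl_cons, pwl_step]; exact ih _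

theorem pwl_main (guess : String) (wrdlst : List String) :
    partition_word_list guess wrdlst = partition_word_list_alt guess wrdlst := by
  unfold partition_word_list partition_word_list_alt
  simp only []
  rw [pwl_foldA]
  set l := wrdlst.map (fun w => (pvFltr guess w, w)) with hl
  set D := l.foldl (fun d p => d.modify p.1 [] (fun l => l ++ [p.2])) PySem.Dict.empty with hD
  have hnd : D.keys.Nodup := by
    rw [hD]
    exact PySem.Dict.nodup_keys_foldl_modify_key l (fun p => p.1) [] (fun d p => (fun l => l ++ [p.2]))
      PySem.Dict.empty (by simp [PySem.Dict.keys_empty])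
  have hkeys : D.keys = PySem.List.dedup (wrdlst.map (fun word => pvFltr guess word)) := by
    rw [hD, PySem.Dict.keys_foldl_modify_key]
    simp [hl, PySem.Dict.keys_empty, PySem.Set.update_nil_left, List.map_map, Function.comp_def]
  have hg : ∀ k, D.getD k [] =
      ((wrdlst.zip (wrdlst.map (fun word => pvFltr guess word))).filter
        (fun p => p.2 == k)).map (fun p => p.1) := by
    intro k
    rw [hD, PySem.Dict.getD_foldl_modify_append, PySem.Dict.getD_empty]
    rw [← List.map_prod_left_eq_zip]
    simp [hl, List.filter_map, List.map_map, Function.comp_def]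
  rw [PySem.Dict.items_eq_map_keys D hnd [], hkeys]
  exact List.map_congr_left (fun k _ => by rw [hg k])

-- ===== VERDICT (by name: the statement is the Claim_ definition above) =====
theorem partition_word_list_spec : Claim_equal_partition_word_list := by
  intro guess wrdlst _
  unfold Spec_partition_word_list
  exact pwl_main guess wrdlst
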